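-- pv_equiv track=rewrite | github.com/Yerinnnn/Algorithm | 백준/Silver/2607. 비슷한 단어/비슷한 단어.py | count_similar_words
-- ===== SOURCE A (Python) =====
-- from collections import Counter
--
-- def count_similar_words(base_word, words):
--     base_counter = Counter(base_word)
--     similar_count = 0
--
--     for word in words:
--         word_counter = Counter(word)
--
--         # 준 단어와 각 비교 대상 단어의 문자 빈도를 비교하여 차이를 계산
--         difference = sum((base_counter - word_counter).values()) + sum((word_counter - base_counter).values())
--
--         # 비슷한 조건 판별
--         # difference == 0: 두 단어가 완전히 같음
--         # difference == 2 and len(base_word) == len(word): 길이가 같고 하나의 문자만 다른 경우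
--         # difference == 1 and abs(len(base_word) - len(word)) == 1: 두 단어의 길이가 하나 차이나며 한 글자 차이인 경우
--         if difference == 0 or (difference == 2 and len(base_word) == len(word)) or (difference == 1 and abs(len(base_word) - len(word)) == 1):
--             similar_count += 1
--
--     return similar_count
-- ===== SOURCE B (Python) =====
-- def count_similar_words(base_word, words):
--     base_chars = list(base_word)
--     base_runs = [(c, base_chars.count(c)) for c in sorted(set(base_word))]
--     n = len(base_word)
--     similar_count = 0
--     for word in words:
--         chars = list(word)
--         runs = [(c, chars.count(c)) for c in sorted(set(word))]
--         # two-pointer merge over the two strictly-increasing run lists,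
--         # accumulating the Counter symmetric-difference total
--         i = j = 0
--         difference = 0
--         while i < len(base_runs) and j < len(runs):
--             c1, n1 = base_runs[i]
--             c2, n2 = runs[j]
--             if c1 == c2:
--                 difference += abs(n1 - n2)
--                 i += 1
--                 j += 1
--             elif c1 < c2:
--                 difference += n1
--                 i += 1
--             else:
--                 difference += n2
--                 j += 1
--         while i < len(base_runs):
--             difference += base_runs[i][1]
--             i += 1
--         while j < len(runs):
--             difference += runs[j][1]
--             j += 1
--         if difference == 0 or (difference == 2 and n == len(word)) or (difference == 1 and abs(n - len(word)) == 1):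
--             similar_count += 1
--     return similar_count
-- ===== Notes on version B (the rewrite author's own statement) =====
-- stated objective: faster
-- what changed: Replaces per-word Counter construction and two Counter subtractions with a sorted run list (distinct char, count) per word and a two-pointer merge of the base and word run lists that accumulates the symmetric-difference total.
import Mathlib
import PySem

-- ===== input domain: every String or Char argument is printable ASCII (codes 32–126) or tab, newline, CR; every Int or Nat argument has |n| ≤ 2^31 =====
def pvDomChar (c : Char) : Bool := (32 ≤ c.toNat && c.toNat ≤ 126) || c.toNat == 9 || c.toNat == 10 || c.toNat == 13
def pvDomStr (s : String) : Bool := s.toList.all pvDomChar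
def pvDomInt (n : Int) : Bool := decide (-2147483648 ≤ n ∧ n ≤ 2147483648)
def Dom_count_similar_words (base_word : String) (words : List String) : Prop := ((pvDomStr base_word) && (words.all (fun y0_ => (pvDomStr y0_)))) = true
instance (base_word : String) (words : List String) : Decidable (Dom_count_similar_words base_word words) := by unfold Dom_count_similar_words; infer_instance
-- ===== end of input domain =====

-- B precomputes each word's sorted distinct-char run list and counts the Counter
-- symmetric-difference total by a two-pointer merge of the two run lists,
-- instead of building and subtracting Counters per word.


-- ===== PORT A =====
-- sum((c1 - c2).values()) for Counters: subtraction keeps only the positive differences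
def counterSubValues (d1 d2 : PySem.Dict Char Int) : List Int :=
  d1.items.filterMap (fun kv =>
    let w := kv.2 - d2.getD kv.1 0
    if 0 < w then some w else none)

def count_similar_words (base_word : String) (words : List String) : Int :=
  let base_counter := PySem.Dict.counter base_word.toList
  words.foldl (fun similar_count word =>
    let word_counter := PySem.Dict.counter word.toList
    let difference := (counterSubValues base_counter word_counter).sum
                    + (counterSubValues word_counter base_counter).sum
    if difference = 0
        ∨ (difference = 2 ∧ PySem.Str.len base_word = PySem.Str.len word)
        ∨ (difference = 1 ∧ (PySem.Str.len base_word - PySem.Str.len word).natAbs = 1)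
    then similar_count + 1 else similar_count) 0

-- ===== PORT B =====
-- run lists: (char, count) for the distinct chars in increasing order
def runsOf (s : String) : List (Char × Int) :=
  (PySem.List.sorted (PySem.Set.ofList s.toList) (fun c => c) false).map
    (fun c => (c, (s.toList.count c : Int)))

def mergeRuns : List (Char × Int) → List (Char × Int) → Int
  | [], rs => (rs.map (·.2)).sum
  | r :: rs, [] => ((r :: rs).map (·.2)).sum
  | (c1, n1) :: rs1, (c2, n2) :: rs2 =>
    if c1 = c2 then ((n1 - n2).natAbs : Int) + mergeRuns rs1 rs2
    else if c1 < c2 then n1 + mergeRuns rs1 ((c2, n2) :: rs2)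
    else n2 + mergeRuns ((c1, n1) :: rs1) rs2
termination_by rs1 rs2 => rs1.length + rs2.length

def count_similar_words_alt (base_word : String) (words : List String) : Int :=
  let base_runs := runsOf base_word
  let n := PySem.Str.len base_word
  words.foldl (fun similar_count word =>
    let difference := mergeRuns base_runs (runsOf word)
    if difference = 0
        ∨ (difference = 2 ∧ n = PySem.Str.len word)
        ∨ (difference = 1 ∧ (n - PySem.Str.len word).natAbs = 1)
    then similar_count + 1 else similar_count) 0

-- ===== PRECONDITION & SPEC =====
def Spec_count_similar_words (base_word : String) (words : List String) (out : Int) : Prop := out = count_similar_words_alt base_word words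
instance (base_word : String) (words : List String) (out : Int) : Decidable (Spec_count_similar_words base_word words out) := by unfold Spec_count_similar_words; infer_instance

-- ===== CLAIM (what is proved, stated in full; the proofs are below) =====
def Claim_equal_count_similar_words : Prop := ∀ (base_word : String) (words : List String), Dom_count_similar_words base_word words → Spec_count_similar_words base_word words (count_similar_words base_word words)

-- ===== LEMMAS AND PROOFS =====

theorem fm_sum (l : List Char) (w : Char → Int) :
    (l.filterMap (fun k => if 0 < w k then some (w k) else none)).sum
      = (l.map (fun k => max (w k) 0)).sum := by
  induction l with
  | nil => simp
  | cons a t ih =>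
    by_cases h : 0 < w a
    · simp [h, ih]; omega
    · simp [h, ih]; omega

theorem natSub_cast (a b : Nat) : ((a - b : Nat) : Int) = max ((a : Int) - b) 0 := by omega

theorem counterSubValues_sum (xs ys : List Char) :
    (counterSubValues (PySem.Dict.counter xs) (PySem.Dict.counter ys)).sum
      = (Multiset.card ((xs : Multiset Char) - (ys : Multiset Char)) : Int) := by
  have h1 : counterSubValues (PySem.Dict.counter xs) (PySem.Dict.counter ys)
      = (PySem.List.dedup xs).filterMap
          (fun k => if 0 < ((xs.count k : Int) - (ys.count k : Int)) then some ((xs.count k : Int) - (ys.count k : Int)) else none) := by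
    unfold counterSubValues
    rw [PySem.Dict.items_counter, List.filterMap_map, ← PySem.List.dedup_eq_ofList]
    simp [Function.comp, PySem.Dict.getD_counter]
  rw [h1, fm_sum]
  have h2 : ∀ k : Char, max ((xs.count k : Int) - (ys.count k : Int)) 0
      = ((xs.count k - ys.count k : Nat) : Int) := fun k => (natSub_cast _ _).symm
  simp only [h2]
  rw [show (fun k : Char => ((xs.count k - ys.count k : Nat) : Int)) = (fun n : Nat => (n : Int)) ∘ (fun k => xs.count k - ys.count k) from rfl,
      ← List.map_map, ← Nat.cast_list_sum]
  congr 1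
  have hnd : (PySem.List.dedup xs).Nodup := PySem.List.nodup_dedup xs
  have hfin : (PySem.List.dedup xs).toFinset = xs.toFinset := by
    ext a; simp
  rw [← List.sum_toFinset _ hnd, hfin]
  have hsub : ((xs : Multiset Char) - (ys : Multiset Char)).toFinset ⊆ xs.toFinset := by
    intro a ha
    simp only [Multiset.mem_toFinset] at ha
    have := Multiset.count_pos.2 ha
    rw [Multiset.count_sub] at this
    simp only [List.mem_toFinset]
    have : 0 < Multiset.count a (xs : Multiset Char) := by omega
    simpa [Multiset.count_pos, Multiset.mem_coe] using this
  rw [← Multiset.toFinset_sum_count_eq ((xs : Multiset Char) - (ys : Multiset Char))]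
  rw [Finset.sum_subset hsub]
  · apply Finset.sum_congr rfl
    intro a _
    rw [Multiset.count_sub]
    simp [Multiset.coe_count]
  · intro a _ ha
    simp only [Multiset.mem_toFinset] at ha
    exact Multiset.count_eq_zero.2 ha

-- rs represents the multiset s: strictly increasing keys, counts taken in s, exactly s's support
def RunRep (rs : List (Char × Int)) (s : Multiset Char) : Prop :=
  rs.Pairwise (fun p q => p.1 < q.1)
    ∧ (∀ p ∈ rs, p.2 = (s.count p.1 : Int))
    ∧ (∀ c : Char, c ∈ s ↔ c ∈ rs.map (·.1))

theorem runrep_zero {rs : List (Char × Int)} {s : Multiset Char} (h : RunRep rs s) (he : rs = []) :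
    s = 0 := by
  subst he
  rcases h with ⟨-, -, hm⟩
  ext a
  simp only [Multiset.count_zero]
  by_contra hne
  have : a ∈ s := Multiset.count_pos.1 (by omega)
  simpa using (hm a).1 this

theorem runrep_sum {rs : List (Char × Int)} {s : Multiset Char} (h : RunRep rs s) :
    (rs.map (·.2)).sum = (Multiset.card s : Int) := by
  rcases h with ⟨hp, hc, hm⟩
  have hkeys : (rs.map (·.1)).Nodup := by
    have : (rs.map (·.1)).Pairwise (· ≠ ·) := by
      rw [List.pairwise_map]; exact hp.imp (fun h => ne_of_lt h)
    exact this
  have h1 : rs.map (·.2) = (rs.map (·.1)).map (fun c => ((s.count c : Nat) : Int)) := by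
    rw [List.map_map]
    exact List.map_congr_left (fun p hp => hc p hp)
  rw [h1, show (fun c : Char => ((s.count c : Nat) : Int)) = (fun n : Nat => (n : Int)) ∘ (fun c => s.count c) from rfl,
      ← List.map_map, ← Nat.cast_list_sum]
  congr 1
  rw [← List.sum_toFinset _ hkeys]
  have hfin : (rs.map (·.1)).toFinset = s.toFinset := by
    ext a; simp only [List.mem_toFinset, Multiset.mem_toFinset]; exact (hm a).symm
  rw [hfin, Multiset.toFinset_sum_count_eq]

theorem runrep_tail {p : Char × Int} {rs : List (Char × Int)} {s : Multiset Char}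
    (h : RunRep (p :: rs) s) : RunRep rs (s.filter (· ≠ p.1)) := by
  rcases h with ⟨hp, hc, hm⟩
  have hlt : ∀ q ∈ rs, p.1 < q.1 := (List.pairwise_cons.1 hp).1
  refine ⟨(List.pairwise_cons.1 hp).2, ?_, ?_⟩
  · intro q hq
    rw [Multiset.count_filter]
    have hne : q.1 ≠ p.1 := ne_of_gt (hlt q hq)
    rw [if_pos hne]
    exact hc q (List.mem_cons_of_mem _ hq)
  · intro c
    rw [Multiset.mem_filter]
    constructor
    · rintro ⟨hcs, hne⟩
      have := (hm c).1 hcs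
      simp only [List.map_cons, List.mem_cons] at this
      rcases this with h' | h'
      · exact absurd h' (by simpa using hne)
      · exact h'
    · intro hc'
      rcases List.mem_map.1 hc' with ⟨q, hq, rfl⟩
      refine ⟨(hm q.1).2 (by simp only [List.map_cons, List.mem_cons]; exact Or.inr (List.mem_map.2 ⟨q, hq, rfl⟩)), ?_⟩
      simpa using ne_of_gt (hlt q hq)

theorem sub_filter_split (s t : Multiset Char) (c : Char) :
    s - t = Multiset.replicate (s.count c - t.count c) c
            + (s.filter (· ≠ c) - t.filter (· ≠ c)) := by
  ext a
  by_cases hac : a = c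
  · subst hac
    simp [Multiset.count_sub, Multiset.count_replicate, Multiset.count_filter]
  · simp [Multiset.count_sub, Multiset.count_replicate, Multiset.count_filter, hac]
    exact fun h => absurd h.symm hac

theorem filter_eq_self_of_count_zero (t : Multiset Char) (c : Char) (h : c ∉ t) :
    t.filter (· ≠ c) = t :=
  Multiset.filter_eq_self.2 (fun a ha => by rintro rfl; exact h ha)

theorem mergeRuns_eq (r1 r2 : List (Char × Int)) :
    ∀ (s t : Multiset Char), RunRep r1 s → RunRep r2 t →
      mergeRuns r1 r2 = (Multiset.card (s - t) : Int) + (Multiset.card (t - s) : Int) := by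
  fun_induction mergeRuns r1 r2 with
  | case1 rs =>
    intro s t h1 h2
    rw [runrep_zero h1 rfl]
    simpa using runrep_sum h2
  | case2 r rs =>
    intro s t h1 h2
    rw [runrep_zero h2 rfl]
    simpa using runrep_sum h1
  | case3 n1 rs1 c n2 rs2 ih =>
    intro s t h1 h2
    have hn1 : n1 = (s.count c : Int) := (h1.2.1 (c, n1) List.mem_cons_self)
    have hn2 : n2 = (t.count c : Int) := (h2.2.1 (c, n2) List.mem_cons_self)
    rw [ih _ _ (runrep_tail h1) (runrep_tail h2)]
    have hs := sub_filter_split s t c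
    have ht := sub_filter_split t s c
    rw [congrArg Multiset.card hs, congrArg Multiset.card ht,
        Multiset.card_add, Multiset.card_add, Multiset.card_replicate, Multiset.card_replicate]
    subst hn1 hn2
    dsimp only
    omega
  | case4 c1 n1 rs1 c2 n2 rs2 hne hlt ih =>
    intro s t h1 h2
    have hn1 : n1 = (s.count c1 : Int) := (h1.2.1 (c1, n1) List.mem_cons_self)
    have hc1t : c1 ∉ t := by
      intro hmem
      have := (h2.2.2 c1).1 hmem
      simp only [List.map_cons, List.mem_cons] at this
      rcases this with h' | h'
      · exact hne h'
      · rcases List.mem_map.1 h' with ⟨q, hq, rfl⟩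
        have := (List.pairwise_cons.1 h2.1).1 q hq
        exact absurd (lt_trans hlt this) (lt_irrefl _)
    have hcount0 : t.count c1 = 0 := Multiset.count_eq_zero.2 hc1t
    have htf : t.filter (· ≠ c1) = t := filter_eq_self_of_count_zero t c1 hc1t
    rw [ih _ _ (runrep_tail h1) h2]
    have hs := sub_filter_split s t c1
    have ht := sub_filter_split t s c1
    rw [htf] at hs ht
    rw [congrArg Multiset.card hs, congrArg Multiset.card ht,
        Multiset.card_add, Multiset.card_add, Multiset.card_replicate, Multiset.card_replicate,
        hcount0]
    subst hn1
    dsimp only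
    omega
  | case5 c1 n1 rs1 c2 n2 rs2 hne hnlt ih =>
    intro s t h1 h2
    have hn2 : n2 = (t.count c2 : Int) := (h2.2.1 (c2, n2) List.mem_cons_self)
    have hlt : c2 < c1 := by
      rcases lt_trichotomy c1 c2 with h | h | h
      · exact absurd h hnlt
      · exact absurd h hne
      · exact h
    have hc2s : c2 ∉ s := by
      intro hmem
      have := (h1.2.2 c2).1 hmem
      simp only [List.map_cons, List.mem_cons] at this
      rcases this with h' | h'
      · exact hne h'.symm
      · rcases List.mem_map.1 h' with ⟨q, hq, rfl⟩
        have := (List.pairwise_cons.1 h1.1).1 q hq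
        exact absurd (lt_trans hlt this) (lt_irrefl _)
    have hcount0 : s.count c2 = 0 := Multiset.count_eq_zero.2 hc2s
    have hsf : s.filter (· ≠ c2) = s := filter_eq_self_of_count_zero s c2 hc2s
    rw [ih _ _ h1 (runrep_tail h2)]
    have hs := sub_filter_split s t c2
    have ht := sub_filter_split t s c2
    rw [hsf] at hs ht
    rw [congrArg Multiset.card hs, congrArg Multiset.card ht,
        Multiset.card_add, Multiset.card_add, Multiset.card_replicate, Multiset.card_replicate,
        hcount0]
    subst hn2
    dsimp only
    omega

theorem runrep_runsOf (w : String) : RunRep (runsOf w) (↑w.toList : Multiset Char) := by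
  refine ⟨?_, ?_, ?_⟩
  · unfold runsOf
    rw [List.pairwise_map]
    exact PySem.List.sorted_ofList_pairwise_lt w.toList
  · intro p hp
    unfold runsOf at hp
    rcases List.mem_map.1 hp with ⟨c, _, rfl⟩
    simp [Multiset.coe_count]
  · intro c
    unfold runsOf
    rw [List.map_map]
    constructor
    · intro h
      refine List.mem_map.2 ⟨c, ?_, rfl⟩
      rw [PySem.List.mem_sorted]
      exact (PySem.Set.mem_ofList _ _).2 (by simpa using h)
    · intro h
      rcases List.mem_map.1 h with ⟨c', hc', rfl⟩
      rw [PySem.List.mem_sorted] at hc'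
      simpa using (PySem.Set.mem_ofList _ _).1 hc'

theorem key_diff (x y : String) :
    (counterSubValues (PySem.Dict.counter x.toList) (PySem.Dict.counter y.toList)).sum
      + (counterSubValues (PySem.Dict.counter y.toList) (PySem.Dict.counter x.toList)).sum
      = mergeRuns (runsOf x) (runsOf y) := by
  rw [mergeRuns_eq (runsOf x) (runsOf y) _ _ (runrep_runsOf x) (runrep_runsOf y),
      counterSubValues_sum, counterSubValues_sum]

-- ===== VERDICT (by name: the statement is the Claim_ definition above) =====
theorem count_similar_words_spec : Claim_equal_count_similar_words := by
  intro base_word words _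
  show count_similar_words base_word words = count_similar_words_alt base_word words
  unfold count_similar_words count_similar_words_alt
  simp only []
  have hf : (fun (similar_count : Int) (word : String) =>
        let word_counter := PySem.Dict.counter word.toList
        let difference := (counterSubValues (PySem.Dict.counter base_word.toList) word_counter).sum
                        + (counterSubValues word_counter (PySem.Dict.counter base_word.toList)).sum
        if difference = 0
            ∨ (difference = 2 ∧ PySem.Str.len base_word = PySem.Str.len word)
            ∨ (difference = 1 ∧ (PySem.Str.len base_word - PySem.Str.len word).natAbs = 1)
        then similar_count + 1 else similar_count)
      = (fun (similar_count : Int) (word : String) =>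
        let difference := mergeRuns (runsOf base_word) (runsOf word)
        if difference = 0
            ∨ (difference = 2 ∧ PySem.Str.len base_word = PySem.Str.len word)
            ∨ (difference = 1 ∧ (PySem.Str.len base_word - PySem.Str.len word).natAbs = 1)
        then similar_count + 1 else similar_count) := by
    funext similar_count word
    simp only []
    rw [key_diff base_word word]
  exact congrFun (congrArg (fun f => List.foldl f (0:Int)) hf) words
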